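-- pv_equiv track=rewrite | github.com/ericmerle3789/Collatz-Junction-Theorem | scripts/tools/session10d_mechanism_II_crt.py | compute_all_corrsums_mod_d
-- ===== SOURCE A (Python) =====
-- from itertools import combinations
--
-- def compute_all_corrsums_mod_d(k, S, d):
--     """Calcule corrSum mod d pour TOUTES les compositions. Retourne une liste."""
--     # Pré-calculer les puissances mod d
--     pow3 = [pow(3, k - 1 - j, d) for j in range(k)]
--     pow2 = [pow(2, a, d) for a in range(S)]
--     base = pow3[0]  # 3^{k-1} mod d
--
--     results = []
--     for positions in combinations(range(1, S), k - 1):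
--         cs = base
--         for j_idx, pos in enumerate(positions):
--             cs = (cs + pow3[j_idx + 1] * pow2[pos]) % d
--         results.append(cs)
--     return results
-- ===== SOURCE B (Python) =====
-- def compute_all_corrsums_mod_d(k, S, d):
--     """corrSum mod d for all compositions: iterative level-by-level expansion of
--     prefixes carrying the running partial sum (shared prefixes, lex order)."""
--     pow3 = [pow(3, k - 1 - j, d) for j in range(k)]
--     pow2 = [pow(2, a, d) for a in range(S)]
--     # frontier: (partial sum, next admissible position) for every viable prefix
--     frontier = [(pow3[0], 1)]
--     for j in range(1, k):
--         nxt = []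
--         for cs, start in frontier:
--             for pos in range(start, S - (k - j) + 1):  # keep enough positions for the tail
--                 nxt.append(((cs + pow3[j] * pow2[pos]) % d, pos + 1))
--         frontier = nxt
--     return [cs for cs, _ in frontier]
-- ===== Notes on version B (the rewrite author's own statement) =====
-- stated objective: alternative
-- what changed: Replaces itertools.combinations plus an O(k) inner re-fold per combination by an iterative level-by-level expansion of prefixes that carries the running partial sum, so each shared prefix sum is computed once and no combination tuples are materialized.
import Mathlib
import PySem

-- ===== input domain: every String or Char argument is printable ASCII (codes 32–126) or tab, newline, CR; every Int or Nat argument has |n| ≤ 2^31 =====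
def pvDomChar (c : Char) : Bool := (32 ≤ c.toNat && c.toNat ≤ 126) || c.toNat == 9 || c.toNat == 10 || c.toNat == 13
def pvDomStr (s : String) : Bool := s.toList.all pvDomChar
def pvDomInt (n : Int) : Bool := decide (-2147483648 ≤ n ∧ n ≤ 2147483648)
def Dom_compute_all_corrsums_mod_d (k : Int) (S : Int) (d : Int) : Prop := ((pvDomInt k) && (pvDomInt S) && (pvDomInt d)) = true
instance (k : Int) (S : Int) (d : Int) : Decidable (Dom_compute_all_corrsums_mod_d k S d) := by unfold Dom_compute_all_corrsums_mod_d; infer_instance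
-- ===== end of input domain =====

-- B drops the per-combination O(k) re-fold of A (itertools.combinations + enumerate-fold):
-- it expands prefixes level by level carrying the running partial sum (alternative algorithm).


-- ===== PORT A =====
-- Python's builtin pow(b, e, m) for e ≥ 0: square-and-multiply, Python '%' at each step (exact for m ≠ 0).
def pvPowMod (b m : Int) (e : Nat) : Int :=
  if h : e = 0 then PySem.Int.mod 1 m
  else
    let r := pvPowMod b m (e / 2)
    let r2 := PySem.Int.mod (r * r) m
    if e % 2 = 1 then PySem.Int.mod (r2 * b) m else r2
  termination_by e
  decreasing_by exact Nat.div_lt_self (Nat.pos_of_ne_zero h) (by norm_num)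

-- itertools.combinations(range(1, S), r) in lexicographic order, ported iteratively (the
-- library is C code): frontiers of (reversed prefix, next admissible position), extended
-- level by level; i counts the elements still to add after the current level.
def pvChoose (S : Int) : Nat → List (List Int × Int) → List (List Int × Int)
  | 0, fr => fr
  | i + 1, fr =>
    pvChoose S i (fr.flatMap (fun pc =>
      (PySem.List.pyRange pc.2 (S - (i : Int)) 1).map (fun pos => (pos :: pc.1, pos + 1))))

def pvCombinations (S : Int) (r : Nat) : List (List Int) :=
  (pvChoose S r [([], 1)]).map (fun pc => pc.1.reverse)

def compute_all_corrsums_mod_d (k : Int) (S : Int) (d : Int) : List Int :=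
  let pow3 : Array Int := ((PySem.List.pyRange 0 k 1).map (fun j => pvPowMod 3 d (k - 1 - j).toNat)).toArray
  let pow2 : Array Int := ((PySem.List.pyRange 0 S 1).map (fun a => pvPowMod 2 d a.toNat)).toArray
  let base := pow3.getD 0 0   -- pow3[0]; Pre_ guarantees k ≥ 1
  (pvCombinations S (k - 1).toNat).map (fun positions =>
    -- state = (j_idx + 1, cs) of the enumerate loop
    (positions.foldl
      (fun st pos =>
        (st.1 + 1, PySem.Int.mod (st.2 + pow3.getD st.1.toNat 0 * pow2.getD pos.toNat 0) d))
      ((1 : Int), base)).2)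

-- ===== PORT B =====
-- one pass of Source B's level loop at level j: extend every (cs, start) of the frontier by
-- each admissible next position (the inner append loop, as flatMap/map)
def pvLevelB (k S d : Int) (pow3 pow2 : Array Int) (fr : List (Int × Int)) (j : Int) : List (Int × Int) :=
  fr.flatMap (fun p =>
    (PySem.List.pyRange p.2 (S - (k - j) + 1) 1).map (fun pos =>
      (PySem.Int.mod (p.1 + pow3.getD j.toNat 0 * pow2.getD pos.toNat 0) d, pos + 1)))

def compute_all_corrsums_mod_d_alt (k : Int) (S : Int) (d : Int) : List Int :=
  let pow3 : Array Int := ((PySem.List.pyRange 0 k 1).map (fun j => pvPowMod 3 d (k - 1 - j).toNat)).toArray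
  let pow2 : Array Int := ((PySem.List.pyRange 0 S 1).map (fun a => pvPowMod 2 d a.toNat)).toArray
  ((PySem.List.pyRange 1 k 1).foldl (pvLevelB k S d pow3 pow2) [(pow3.getD 0 0, (1 : Int))]).map Prod.fst

-- ===== PRECONDITION & SPEC =====
-- Python A raises IndexError on pow3[0] when k < 1 and ValueError in pow(…, d) when d = 0.
def Pre_compute_all_corrsums_mod_d (k : Int) (_S : Int) (d : Int) : Prop := 1 ≤ k ∧ d ≠ 0
instance (k : Int) (S : Int) (d : Int) : Decidable (Pre_compute_all_corrsums_mod_d k S d) := by unfold Pre_compute_all_corrsums_mod_d; infer_instance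
def pvWitness_compute_all_corrsums_mod_d : Int × Int × Int := (2, 4, 5)

def Spec_compute_all_corrsums_mod_d (k : Int) (S : Int) (d : Int) (out : List Int) : Prop := out = compute_all_corrsums_mod_d_alt k S d
instance (k : Int) (S : Int) (d : Int) (out : List Int) : Decidable (Spec_compute_all_corrsums_mod_d k S d out) := by unfold Spec_compute_all_corrsums_mod_d; infer_instance

-- ===== CLAIM (what is proved, stated in full; the proofs are below) =====
def Claim_equal_compute_all_corrsums_mod_d : Prop := ∀ (k : Int) (S : Int) (d : Int), Dom_compute_all_corrsums_mod_d k S d → Pre_compute_all_corrsums_mod_d k S d → Spec_compute_all_corrsums_mod_d k S d (compute_all_corrsums_mod_d k S d)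

-- ===== LEMMAS AND PROOFS =====
-- A's inner enumerate loop, as a plain index-carrying recursion (proof vocabulary only).
def pvFoldA (d : Int) (pow3 pow2 : Array Int) : Int → List Int → Int → Int
  | _, [], cs => cs
  | j, p :: ps, cs =>
    pvFoldA d pow3 pow2 (j + 1) ps
      (PySem.Int.mod (cs + pow3.getD j.toNat 0 * pow2.getD p.toNat 0) d)

-- B's level loop re-indexed by the number i of levels still to run (j = k - i - 1 at each step).
def pvBGo (k S d : Int) (pow3 pow2 : Array Int) : Nat → List (Int × Int) → List (Int × Int)
  | 0, fr => fr
  | i + 1, fr => pvBGo k S d pow3 pow2 i (pvLevelB k S d pow3 pow2 fr (k - (i : Int) - 1))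

-- the A-side reading of a reversed prefix: its partial sum and its next admissible position
def pvPhi (d : Int) (pow3 pow2 : Array Int) (base : Int) (pc : List Int × Int) : Int × Int :=
  (pvFoldA d pow3 pow2 1 pc.1.reverse base, pc.2)

theorem pvFoldA_eq_foldl (d : Int) (pow3 pow2 : Array Int) :
    ∀ (ps : List Int) (j cs : Int),
      (ps.foldl
        (fun st pos =>
          (st.1 + 1, PySem.Int.mod (st.2 + pow3.getD st.1.toNat 0 * pow2.getD pos.toNat 0) d))
        (j, cs)).2 = pvFoldA d pow3 pow2 j ps cs := by
  intro ps
  induction ps with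
  | nil => intro j cs; simp [pvFoldA]
  | cons p rest ih => intro j cs; simp only [List.foldl_cons, pvFoldA]; exact ih _ _

theorem pvFoldA_append (d : Int) (pow3 pow2 : Array Int) :
    ∀ (t : List Int) (j pos cs : Int),
      pvFoldA d pow3 pow2 j (t ++ [pos]) cs
        = PySem.Int.mod
            (pvFoldA d pow3 pow2 j t cs + pow3.getD (j + (t.length : Int)).toNat 0 * pow2.getD pos.toNat 0) d := by
  intro t
  induction t with
  | nil => intro j pos cs; simp [pvFoldA]
  | cons x rest ih =>
    intro j pos cs
    simp only [List.cons_append, pvFoldA, ih]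
    have hx : j + 1 + ((rest.length : Nat) : Int) = j + (((x :: rest).length : Nat) : Int) := by
      simp only [List.length_cons]; push_cast; ring
    rw [hx]

theorem pvBGo_eq_foldl (k S d : Int) (pow3 pow2 : Array Int) :
    ∀ (i : Nat) (fr : List (Int × Int)),
      (PySem.List.pyRange (k - (i : Int)) k 1).foldl (pvLevelB k S d pow3 pow2) fr
        = pvBGo k S d pow3 pow2 i fr := by
  intro i
  induction i with
  | zero =>
    intro fr
    rw [PySem.List.pyRange_one_eq_nil (by omega)]
    rfl
  | succ n ih =>
    intro fr
    rw [PySem.List.pyRange_one_cons (by omega), List.foldl_cons]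
    have h1 : k - ((n : Int) + 1) + 1 = k - (n : Int) := by ring
    have h2 : (((n : Nat) + 1 : Nat) : Int) = (n : Int) + 1 := by push_cast; ring
    have h3 : k - ((n : Int) + 1) = k - (n : Int) - 1 := by ring
    rw [h2, h1, ih, h3]
    rfl

theorem pvBGo_commute (k S d : Int) (pow3 pow2 : Array Int) (base : Int) :
    ∀ (i : Nat) (fr : List (List Int × Int)),
      (∀ pc ∈ fr, (pc.1.length : Int) = k - (i : Int) - 1) →
      pvBGo k S d pow3 pow2 i (fr.map (pvPhi d pow3 pow2 base))
        = (pvChoose S i fr).map (pvPhi d pow3 pow2 base) := by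
  intro i
  induction i with
  | zero => intro fr _; rfl
  | succ n ih =>
    intro fr hlen
    show pvBGo k S d pow3 pow2 n
        (pvLevelB k S d pow3 pow2 (fr.map (pvPhi d pow3 pow2 base)) (k - (n : Int) - 1))
      = (pvChoose S n (fr.flatMap (fun pc =>
          (PySem.List.pyRange pc.2 (S - (n : Int)) 1).map (fun pos => (pos :: pc.1, pos + 1))))).map
          (pvPhi d pow3 pow2 base)
    rw [← ih _ (by
      intro pc hpc
      rcases List.mem_flatMap.mp hpc with ⟨q, hq, hpc'⟩
      rcases List.mem_map.mp hpc' with ⟨pos, _, rfl⟩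
      have := hlen q hq
      simp only [List.length_cons]
      push_cast
      omega)]
    congr 1
    -- one level: extending the images = image of the extensions
    unfold pvLevelB
    rw [List.flatMap_map, List.map_flatMap]
    apply List.flatMap_congr
    intro pc hpc
    have hq : (pc.1.length : Int) = k - ((n : Int) + 1) - 1 := by
      have := hlen pc hpc; push_cast at this ⊢; omega
    have hbound : S - (k - (k - (n : Int) - 1)) + 1 = S - (n : Int) := by ring
    simp only [pvPhi, hbound, List.map_map]
    apply List.map_congr_left
    intro pos _
    simp only [Function.comp, pvPhi, List.reverse_cons, pvFoldA_append]
    have hidx : (1 : Int) + ((pc.1.reverse.length : Nat) : Int) = k - (n : Int) - 1 := by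
      rw [List.length_reverse]; omega
    rw [hidx]

-- ===== VERDICT (by name: the statement is the Claim_ definition above) =====
theorem compute_all_corrsums_mod_d_spec : Claim_equal_compute_all_corrsums_mod_d := by
  intro k S d _ hpre
  obtain ⟨hk, -⟩ := hpre
  have hcast : (((k - 1).toNat : Nat) : Int) = k - 1 := Int.toNat_of_nonneg (by omega)
  unfold Spec_compute_all_corrsums_mod_d compute_all_corrsums_mod_d compute_all_corrsums_mod_d_alt
  dsimp only
  generalize (((PySem.List.pyRange 0 k 1).map (fun j => pvPowMod 3 d (k - 1 - j).toNat)).toArray : Array Int) = P3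
  generalize (((PySem.List.pyRange 0 S 1).map (fun a => pvPowMod 2 d a.toNat)).toArray : Array Int) = P2
  rw [show PySem.List.pyRange 1 k 1 = PySem.List.pyRange (k - (((k - 1).toNat : Nat) : Int)) k 1 by
    rw [hcast]; ring_nf]
  rw [pvBGo_eq_foldl k S d P3 P2 (k - 1).toNat]
  have hstart : [(P3.getD 0 0, (1 : Int))]
      = [((([] : List Int), (1 : Int)))].map (pvPhi d P3 P2 (P3.getD 0 0)) := by
    simp [pvPhi, pvFoldA]
  rw [hstart, pvBGo_commute k S d P3 P2 (P3.getD 0 0) (k - 1).toNat _ (by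
    intro pc hpc
    simp only [List.mem_singleton] at hpc
    subst hpc
    simp only [List.length_nil, Nat.cast_zero, hcast]
    omega)]
  unfold pvCombinations
  rw [List.map_map, List.map_map]
  apply List.map_congr_left
  intro pc _
  simp only [Function.comp, pvPhi]
  exact pvFoldA_eq_foldl d P3 P2 pc.1.reverse 1 (P3.getD 0 0)
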